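-- pv_equiv track=rewrite | github.com/Michalmaciej/Sorting_Algorithms_Visualization | three_way_merge_sort.py | _merge_gen
-- ===== SOURCE A (Python) =====
-- def _merge_gen(nums, left, mid1, mid2, right):
--     size1 = mid1 - left + 1
--     size2 = mid2 - mid1
--     size3 = right - mid2
--
--     left_arr = nums[left:left + size1]
--     mid_arr = nums[mid1 + 1:mid1 + 1 + size2]
--     right_arr = nums[mid2 + 1:mid2 + 1 + size3]
--
--     i = j = k = 0
--     index = left
--
--     while i < size1 or j < size2 or k < size3:
--         min_value = float('inf')
--         min_idx = -1
--
--         if i < size1 and left_arr[i] < min_value: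
--             min_value = left_arr[i]
--             min_idx = 0
--         if j < size2 and mid_arr[j] < min_value:
--             min_value = mid_arr[j]
--             min_idx = 1
--         if k < size3 and right_arr[k] < min_value:
--             min_value = right_arr[k]
--             min_idx = 2
--
--         if min_idx == 0:
--             nums[index] = left_arr[i]
--             i += 1
--         elif min_idx == 1:
--             nums[index] = mid_arr[j]
--             j += 1
--         else:
--             nums[index] = right_arr[k]
--             k += 1
--
--         yield (nums.copy(), index, -1, (0, 0))
--         index += 1
-- ===== SOURCE B (Python) =====
-- def _merge_gen(nums, left, mid1, mid2, right):
--     # B: gather the three runs by index range, merge them with two staged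
--     # two-pointer merges (left+mid, then with right), then one write/yield pass.
--     # (A instead rescans all three heads with an inf sentinel at every step.)
--     # Mutates nums in place exactly like A.
--     left_arr = [nums[p] for p in range(left, mid1 + 1)]
--     mid_arr = [nums[p] for p in range(mid1 + 1, mid2 + 1)]
--     right_arr = [nums[p] for p in range(mid2 + 1, right + 1)]
--
--     def merge2(a, b):
--         out = []
--         i = j = 0
--         while i < len(a) and j < len(b):
--             if a[i] <= b[j]:
--                 out.append(a[i])
--                 i += 1
--             else:
--                 out.append(b[j])
--                 j += 1
--         out.extend(a[i:])
--         out.extend(b[j:])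
--         return out
--
--     merged = merge2(merge2(left_arr, mid_arr), right_arr)
--     for offset, value in enumerate(merged):
--         nums[left + offset] = value
--         yield (nums.copy(), left + offset, -1, (0, 0))
-- ===== Notes on version B (the rewrite author's own statement) =====
-- stated objective: alternative
-- what changed: Replaces A's per-element 3-way minimum scan with a float('inf') sentinel by gathering the three runs, merging them with two staged two-pointer merges (left+mid, then with right), and one final write/yield pass; Pre_ excludes only the inputs on which A raises IndexError (a subarray shorter than its computed positive size, or a write index out of range).
import Mathlib
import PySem

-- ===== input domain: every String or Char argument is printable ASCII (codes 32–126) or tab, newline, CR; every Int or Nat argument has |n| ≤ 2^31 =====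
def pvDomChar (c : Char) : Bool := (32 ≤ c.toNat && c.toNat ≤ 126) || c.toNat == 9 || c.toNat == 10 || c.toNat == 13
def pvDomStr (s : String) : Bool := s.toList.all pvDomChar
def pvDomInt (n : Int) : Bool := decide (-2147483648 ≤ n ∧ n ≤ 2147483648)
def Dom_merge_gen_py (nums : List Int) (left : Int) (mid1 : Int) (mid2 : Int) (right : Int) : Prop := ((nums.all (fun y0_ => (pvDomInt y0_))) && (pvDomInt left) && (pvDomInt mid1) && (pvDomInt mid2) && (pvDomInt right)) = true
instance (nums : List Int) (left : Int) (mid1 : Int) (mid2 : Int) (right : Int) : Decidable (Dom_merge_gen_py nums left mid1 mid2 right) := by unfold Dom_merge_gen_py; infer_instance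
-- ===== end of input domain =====

-- B replaces A's per-step 3-way minimum scan (with an inf sentinel) by two staged
-- two-pointer merges followed by one write/yield pass; equivalence is about the
-- yielded list (both mutate nums identically; the yielded copies record the writes).

-- ===== PORT A =====
-- float('inf') modeled as `none` (exact here: all compared values are ints, every int < inf)
def pyLtInf (a : Int) : Option Int → Bool
  | none => true
  | some v => decide (a < v)

-- the while-loop of A; fuel bounds the iteration count (exact whenever A returns)
def mergeLoopA (leftArr midArr rightArr : List Int) (size1 size2 size3 : Int) :
    Nat → List Int → Nat → Nat → Nat → Int →
    List (List Int × Int × Int × (Int × Int)) → List (List Int × Int × Int × (Int × Int))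
  | 0, _, _, _, _, _, acc => acc
  | fuel+1, nums, i, j, k, index, acc =>
    if (i : Int) < size1 ∨ (j : Int) < size2 ∨ (k : Int) < size3 then
      -- min_value = inf, min_idx = -1, then the three sequential updates
      let p0 : Option Int × Int := (none, -1)
      let p1 := if (i : Int) < size1 ∧ pyLtInf (PySem.List.pyGetD leftArr (i : Int) 0) p0.1 = true
                then (some (PySem.List.pyGetD leftArr (i : Int) 0), (0 : Int)) else p0
      let p2 := if (j : Int) < size2 ∧ pyLtInf (PySem.List.pyGetD midArr (j : Int) 0) p1.1 = true
                then (some (PySem.List.pyGetD midArr (j : Int) 0), (1 : Int)) else p1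
      let p3 := if (k : Int) < size3 ∧ pyLtInf (PySem.List.pyGetD rightArr (k : Int) 0) p2.1 = true
                then (some (PySem.List.pyGetD rightArr (k : Int) 0), (2 : Int)) else p2
      if p3.2 = 0 then
        let nums' := PySem.List.pySetD nums index (PySem.List.pyGetD leftArr (i : Int) 0)
        mergeLoopA leftArr midArr rightArr size1 size2 size3 fuel nums' (i+1) j k (index+1)
          (acc ++ [(nums', index, -1, (0, 0))])
      else if p3.2 = 1 then
        let nums' := PySem.List.pySetD nums index (PySem.List.pyGetD midArr (j : Int) 0)
        mergeLoopA leftArr midArr rightArr size1 size2 size3 fuel nums' i (j+1) k (index+1)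
          (acc ++ [(nums', index, -1, (0, 0))])
      else
        let nums' := PySem.List.pySetD nums index (PySem.List.pyGetD rightArr (k : Int) 0)
        mergeLoopA leftArr midArr rightArr size1 size2 size3 fuel nums' i j (k+1) (index+1)
          (acc ++ [(nums', index, -1, (0, 0))])
    else acc

def merge_gen_py (nums : List Int) (left : Int) (mid1 : Int) (mid2 : Int) (right : Int) : List (List Int × Int × Int × (Int × Int)) :=
  let size1 := mid1 - left + 1
  let size2 := mid2 - mid1
  let size3 := right - mid2
  let leftArr := PySem.List.slice nums (some left) (some (left + size1))
  let midArr := PySem.List.slice nums (some (mid1 + 1)) (some (mid1 + 1 + size2))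
  let rightArr := PySem.List.slice nums (some (mid2 + 1)) (some (mid2 + 1 + size3))
  mergeLoopA leftArr midArr rightArr size1 size2 size3
    (size1.toNat + size2.toNat + size3.toNat) nums 0 0 0 left []

-- ===== PORT B =====
-- Source B gathers the three runs by index range (list comprehension over range(...))
-- two-pointer merge of two lists (Source B's merge2; the index pair becomes structural recursion)
def merge2 : List Int → List Int → List Int
  | [], b => b
  | x :: a, [] => x :: a
  | x :: a, y :: b => if x ≤ y then x :: merge2 a (y :: b) else y :: merge2 (x :: a) b

-- Source B's final for-loop: write each merged value and record the yielded snapshot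
def writeSteps : List Int → List Int → Int → List (List Int × Int × Int × (Int × Int))
  | [], _, _ => []
  | v :: vs, nums, idx =>
    let nums' := PySem.List.pySetD nums idx v
    (nums', idx, -1, (0, 0)) :: writeSteps vs nums' (idx + 1)

def merge_gen_py_alt (nums : List Int) (left : Int) (mid1 : Int) (mid2 : Int) (right : Int) : List (List Int × Int × Int × (Int × Int)) :=
  let leftArr := (PySem.List.pyRange left (mid1 + 1) 1).map (fun p => PySem.List.pyGetD nums p 0)
  let midArr := (PySem.List.pyRange (mid1 + 1) (mid2 + 1) 1).map (fun p => PySem.List.pyGetD nums p 0)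
  let rightArr := (PySem.List.pyRange (mid2 + 1) (right + 1) 1).map (fun p => PySem.List.pyGetD nums p 0)
  writeSteps (merge2 (merge2 leftArr midArr) rightArr) nums left

-- ===== PRECONDITION & SPEC =====
-- Pre_ is exactly the set of inputs on which A returns (no IndexError): each subarray with a
-- positive computed size must really have that many elements, and every written index must
-- be in range; it excludes nothing A returns on.
def Pre_merge_gen_py (nums : List Int) (left : Int) (mid1 : Int) (mid2 : Int) (right : Int) : Prop :=
  (mid1 - left + 1 ≤ 0 ∨ ((PySem.List.slice nums (some left) (some (mid1 + 1))).length : Int) = mid1 - left + 1) ∧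
  (mid2 - mid1 ≤ 0 ∨ ((PySem.List.slice nums (some (mid1 + 1)) (some (mid2 + 1))).length : Int) = mid2 - mid1) ∧
  (right - mid2 ≤ 0 ∨ ((PySem.List.slice nums (some (mid2 + 1)) (some (right + 1))).length : Int) = right - mid2) ∧
  (max (mid1 - left + 1) 0 + max (mid2 - mid1) 0 + max (right - mid2) 0 = 0 ∨
    (-(nums.length : Int) ≤ left ∧
      left + (max (mid1 - left + 1) 0 + max (mid2 - mid1) 0 + max (right - mid2) 0) ≤ (nums.length : Int)))
instance (nums : List Int) (left : Int) (mid1 : Int) (mid2 : Int) (right : Int) : Decidable (Pre_merge_gen_py nums left mid1 mid2 right) := by unfold Pre_merge_gen_py; infer_instance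

def pvWitness_merge_gen_py : List Int × Int × Int × Int × Int := ([3, 1, 2, 4], 0, 0, 1, 3)

def Spec_merge_gen_py (nums : List Int) (left : Int) (mid1 : Int) (mid2 : Int) (right : Int) (out : List (List Int × Int × Int × (Int × Int))) : Prop := out = merge_gen_py_alt nums left mid1 mid2 right
instance (nums : List Int) (left : Int) (mid1 : Int) (mid2 : Int) (right : Int) (out : List (List Int × Int × Int × (Int × Int))) : Decidable (Spec_merge_gen_py nums left mid1 mid2 right out) := by unfold Spec_merge_gen_py; infer_instance

-- ===== CLAIM (what is proved, stated in full; the proofs are below) =====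
def Claim_equal_merge_gen_py : Prop := ∀ (nums : List Int) (left : Int) (mid1 : Int) (mid2 : Int) (right : Int), Dom_merge_gen_py nums left mid1 mid2 right → Pre_merge_gen_py nums left mid1 mid2 right → Spec_merge_gen_py nums left mid1 mid2 right (merge_gen_py nums left mid1 mid2 right)

-- ===== LEMMAS AND PROOFS =====

-- A's selection rule, as one structural 3-way merge (priority left > mid > right on ties)
def merge3 : List Int → List Int → List Int → List Int
  | [], [], [] => []
  | [], [], z :: r => z :: merge3 [] [] r
  | [], y :: m, [] => y :: merge3 [] m []
  | [], y :: m, z :: r => if y ≤ z then y :: merge3 [] m (z :: r) else z :: merge3 [] (y :: m) r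
  | x :: a, [], [] => x :: merge3 a [] []
  | x :: a, [], z :: r => if x ≤ z then x :: merge3 a [] (z :: r) else z :: merge3 (x :: a) [] r
  | x :: a, y :: m, [] => if x ≤ y then x :: merge3 a (y :: m) [] else y :: merge3 (x :: a) m []
  | x :: a, y :: m, z :: r =>
    if x ≤ y ∧ x ≤ z then x :: merge3 a (y :: m) (z :: r)
    else if y < x ∧ y ≤ z then y :: merge3 (x :: a) m (z :: r)
    else z :: merge3 (x :: a) (y :: m) r

lemma merge2_nil_right (b : List Int) : merge2 b [] = b := by
  cases b <;> simp [merge2]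

-- staged pairwise merging equals A's 3-way selection (on arbitrary, not nec. sorted, lists)
lemma merge3_eq_merge2_bounded : ∀ (n : Nat) (a m r : List Int),
    a.length + m.length + r.length ≤ n → merge3 a m r = merge2 (merge2 a m) r := by
  intro n
  induction n with
  | zero =>
    intro a m r h
    obtain rfl : a = [] := List.length_eq_zero_iff.mp (by omega)
    obtain rfl : m = [] := List.length_eq_zero_iff.mp (by omega)
    obtain rfl : r = [] := List.length_eq_zero_iff.mp (by omega)
    simp [merge3, merge2]
  | succ n ih =>
    intro a m r h
    match a, m, r with
    | [], [], [] => simp [merge3, merge2]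
    | [], [], z :: r =>
      simp only [merge3, merge2]
      rw [ih [] [] r (by simp at h ⊢; omega)]
      simp [merge2]
    | [], y :: m, [] =>
      simp only [merge3, merge2, merge2_nil_right]
      rw [ih [] m [] (by simp at h ⊢; omega)]
      simp [merge2, merge2_nil_right]
    | [], y :: m, z :: r =>
      by_cases hyz : y ≤ z
      · rw [show merge3 [] (y :: m) (z :: r) = y :: merge3 [] m (z :: r) from by simp [merge3, hyz]]
        rw [show merge2 (merge2 [] (y :: m)) (z :: r) = y :: merge2 (merge2 [] m) (z :: r) from by
          simp [merge2, hyz]]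
        rw [ih [] m (z :: r) (by simp at h ⊢; omega)]
      · rw [show merge3 [] (y :: m) (z :: r) = z :: merge3 [] (y :: m) r from by simp [merge3, hyz]]
        rw [show merge2 (merge2 [] (y :: m)) (z :: r) = z :: merge2 (merge2 [] (y :: m)) r from by
          simp [merge2, hyz]]
        rw [ih [] (y :: m) r (by simp at h ⊢; omega)]
    | x :: a, [], [] =>
      simp only [merge3, merge2, merge2_nil_right]
      rw [ih a [] [] (by simp at h ⊢; omega)]
      simp [merge2, merge2_nil_right]
    | x :: a, [], z :: r =>
      by_cases hxz : x ≤ z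
      · rw [show merge3 (x :: a) [] (z :: r) = x :: merge3 a [] (z :: r) from by simp [merge3, hxz]]
        rw [show merge2 (merge2 (x :: a) []) (z :: r) = x :: merge2 (merge2 a []) (z :: r) from by
          simp [merge2, merge2_nil_right, hxz]]
        rw [ih a [] (z :: r) (by simp at h ⊢; omega)]
      · rw [show merge3 (x :: a) [] (z :: r) = z :: merge3 (x :: a) [] r from by simp [merge3, hxz]]
        rw [show merge2 (merge2 (x :: a) []) (z :: r) = z :: merge2 (merge2 (x :: a) []) r from by
          simp [merge2, merge2_nil_right, hxz]]
        rw [ih (x :: a) [] r (by simp at h ⊢; omega)]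
    | x :: a, y :: m, [] =>
      by_cases hxy : x ≤ y
      · rw [show merge3 (x :: a) (y :: m) [] = x :: merge3 a (y :: m) [] from by simp [merge3, hxy],
            merge2_nil_right,
            show merge2 (x :: a) (y :: m) = x :: merge2 a (y :: m) from by simp [merge2, hxy],
            ih a (y :: m) [] (by simp at h ⊢; omega), merge2_nil_right]
      · rw [show merge3 (x :: a) (y :: m) [] = y :: merge3 (x :: a) m [] from by simp [merge3, hxy],
            merge2_nil_right,
            show merge2 (x :: a) (y :: m) = y :: merge2 (x :: a) m from by simp [merge2, hxy],
            ih (x :: a) m [] (by simp at h ⊢; omega), merge2_nil_right]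
    | x :: a, y :: m, z :: r =>
      by_cases hxy : x ≤ y
      · have hm : merge2 (x :: a) (y :: m) = x :: merge2 a (y :: m) := by simp [merge2, hxy]
        by_cases hxz : x ≤ z
        · rw [show merge3 (x :: a) (y :: m) (z :: r) = x :: merge3 a (y :: m) (z :: r) from by
            simp [merge3, hxy, hxz]]
          rw [hm, show merge2 (x :: merge2 a (y :: m)) (z :: r)
              = x :: merge2 (merge2 a (y :: m)) (z :: r) from by simp [merge2, hxz]]
          rw [ih a (y :: m) (z :: r) (by simp at h ⊢; omega)]
        · have n1 : ¬ (x ≤ y ∧ x ≤ z) := by tauto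
          have n2 : ¬ (y < x ∧ y ≤ z) := by omega
          rw [show merge3 (x :: a) (y :: m) (z :: r) = z :: merge3 (x :: a) (y :: m) r from by
            simp [merge3, n1, n2]]
          rw [hm, show merge2 (x :: merge2 a (y :: m)) (z :: r)
              = z :: merge2 (x :: merge2 a (y :: m)) r from by simp [merge2, hxz]]
          rw [← hm, ih (x :: a) (y :: m) r (by simp at h ⊢; omega)]
      · have hm : merge2 (x :: a) (y :: m) = y :: merge2 (x :: a) m := by simp [merge2, hxy]
        by_cases hyz : y ≤ z
        · have n1 : ¬ (x ≤ y ∧ x ≤ z) := by tauto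
          have p2 : y < x ∧ y ≤ z := by omega
          rw [show merge3 (x :: a) (y :: m) (z :: r) = y :: merge3 (x :: a) m (z :: r) from by
            simp [merge3, n1, p2]]
          rw [hm, show merge2 (y :: merge2 (x :: a) m) (z :: r)
              = y :: merge2 (merge2 (x :: a) m) (z :: r) from by simp [merge2, hyz]]
          rw [ih (x :: a) m (z :: r) (by simp at h ⊢; omega)]
        · have n1 : ¬ (x ≤ y ∧ x ≤ z) := by tauto
          have n2 : ¬ (y < x ∧ y ≤ z) := by tauto
          rw [show merge3 (x :: a) (y :: m) (z :: r) = z :: merge3 (x :: a) (y :: m) r from by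
            simp [merge3, n1, n2]]
          rw [hm, show merge2 (y :: merge2 (x :: a) m) (z :: r)
              = z :: merge2 (y :: merge2 (x :: a) m) r from by simp [merge2, hyz]]
          rw [← hm, ih (x :: a) (y :: m) r (by simp at h ⊢; omega)]

lemma merge3_eq_merge2 (a m r : List Int) : merge3 a m r = merge2 (merge2 a m) r :=
  merge3_eq_merge2_bounded (a.length + m.length + r.length) a m r le_rfl

-- inside Pre_, a range-gather equals the corresponding Python slice
lemma gather_eq_slice (nums : List Int) (a b : Int)
    (hlen : ((PySem.List.slice nums (some a) (some b)).length : Int) = b - a) :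
    (PySem.List.pyRange a b 1).map (fun p => PySem.List.pyGetD nums p 0)
      = PySem.List.slice nums (some a) (some b) := by
  by_cases hab : a < b
  · have hcl := PySem.List.length_slice nums a b
    have hca := PySem.List.clampIdx_le nums.length a
    have hcb := PySem.List.clampIdx_le nums.length b
    have hax : ((PySem.List.clampIdx nums.length a : Int)
          = if a < 0 then (nums.length : Int) + a else a) ∧ -(nums.length : Int) ≤ a := by
      simp only [PySem.List.clampIdx] at hcl ⊢
      split_ifs at hcl ⊢ <;> omega
    obtain ⟨hax, han⟩ := hax
    apply List.ext_getElem
    · simp only [List.length_map, PySem.List.length_slice, PySem.List.pyRange, hab]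
      simp [hab]
      omega
    · intro i h1 h2
      simp only [PySem.List.pyRange, if_pos hab] at h1 ⊢
      simp only [List.getElem_map, List.getElem_range, List.length_map, List.length_range, if_neg (by omega : ¬ (1:Int) = 0),
        if_pos (by omega : (0:Int) < 1), if_pos hab] at h1 ⊢
      have hilt : (i : Int) < b - a := by omega
      have hidx : PySem.List.clampIdx nums.length a + i < nums.length := by omega
      have key : PySem.List.pyGetD nums (a + 1 * (i : Int)) 0 = nums[PySem.List.clampIdx nums.length a + i] := by
        simp only [PySem.List.pyGetD, PySem.List.pyGet?, PySem.List.pyIdx?]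
        split_ifs with hnn hlt hng
        · have hto : (a + 1 * (i : Int)).toNat = PySem.List.clampIdx nums.length a + i := by omega
          rw [hto]
          simp [List.getElem?_eq_getElem hidx]
        · exfalso; omega
        · have hto : nums.length - (-(a + 1 * (i : Int))).toNat = PySem.List.clampIdx nums.length a + i := by omega
          rw [hto]
          simp [List.getElem?_eq_getElem hidx]
        · exfalso; omega
      rw [key]
      simp only [PySem.List.slice]
      rw [List.getElem_take, List.getElem_drop]
  · have hba : b = a := by
      have : (0:Int) ≤ ((PySem.List.slice nums (some a) (some b)).length : Int) := by positivity
      omega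
    subst hba
    have h0 : (PySem.List.slice nums (some b) (some b)).length = 0 := by omega
    rw [List.length_eq_zero_iff.mp h0]
    simp [PySem.List.pyRange]

-- the loop characterization: A's while-loop emits exactly the write/yield pass over merge3
-- of the effective runs la'/ma'/ra' (la' = la where the loop can read it, i.e. when s1 > 0)
set_option maxHeartbeats 2000000 in
lemma loopA_eq (la ma ra la' ma' ra' : List Int) (s1 s2 s3 : Int)
    (h1 : (la'.length : Int) = max s1 0) (h2 : (ma'.length : Int) = max s2 0)
    (h3 : (ra'.length : Int) = max s3 0)
    (r1 : ∀ i : Nat, ((i : Nat) : Int) < s1 → PySem.List.pyGetD la ((i : Nat) : Int) 0 = PySem.List.pyGetD la' ((i : Nat) : Int) 0)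
    (r2 : ∀ j : Nat, ((j : Nat) : Int) < s2 → PySem.List.pyGetD ma ((j : Nat) : Int) 0 = PySem.List.pyGetD ma' ((j : Nat) : Int) 0)
    (r3 : ∀ k : Nat, ((k : Nat) : Int) < s3 → PySem.List.pyGetD ra ((k : Nat) : Int) 0 = PySem.List.pyGetD ra' ((k : Nat) : Int) 0) :
    ∀ (fuel i j k : Nat) (nums : List Int) (index : Int)
      (acc : List (List Int × Int × Int × (Int × Int))),
      (la'.length - i) + (ma'.length - j) + (ra'.length - k) ≤ fuel →
      mergeLoopA la ma ra s1 s2 s3 fuel nums i j k index acc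
        = acc ++ writeSteps (merge3 (la'.drop i) (ma'.drop j) (ra'.drop k)) nums index := by
  intro fuel
  induction fuel with
  | zero =>
    intro i j k nums index acc hfuel
    have di : la'.drop i = [] := List.drop_eq_nil_of_le (by omega)
    have dj : ma'.drop j = [] := List.drop_eq_nil_of_le (by omega)
    have dk : ra'.drop k = [] := List.drop_eq_nil_of_le (by omega)
    simp [mergeLoopA, di, dj, dk, merge3, writeSteps]
  | succ fuel ih =>
    intro i j k nums index acc hfuel
    have c1 : ((i : Int) < s1) ↔ i < la'.length := by omega
    have c2 : ((j : Int) < s2) ↔ j < ma'.length := by omega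
    have c3 : ((k : Int) < s3) ↔ k < ra'.length := by omega
    by_cases hi : i < la'.length <;> by_cases hj : j < ma'.length <;> by_cases hk : k < ra'.length
    · have eX : PySem.List.pyGetD la ((i : Nat) : Int) 0 = la'[i] := by rw [r1 i (c1.mpr hi), PySem.List.pyGetD_natCast]; exact List.getD_eq_getElem la' 0 hi
      have dX : la'.drop i = la'[i] :: la'.drop (i+1) := List.drop_eq_getElem_cons hi
      have eY : PySem.List.pyGetD ma ((j : Nat) : Int) 0 = ma'[j] := by rw [r2 j (c2.mpr hj), PySem.List.pyGetD_natCast]; exact List.getD_eq_getElem ma' 0 hj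
      have dY : ma'.drop j = ma'[j] :: ma'.drop (j+1) := List.drop_eq_getElem_cons hj
      have eZ : PySem.List.pyGetD ra ((k : Nat) : Int) 0 = ra'[k] := by rw [r3 k (c3.mpr hk), PySem.List.pyGetD_natCast]; exact List.getD_eq_getElem ra' 0 hk
      have dZ : ra'.drop k = ra'[k] :: ra'.drop (k+1) := List.drop_eq_getElem_cons hk
      simp only [mergeLoopA, pyLtInf]
      rw [if_pos (show ((i:Int) < s1 ∨ (j:Int) < s2 ∨ (k:Int) < s3) from by omega)]
      split_ifs
      all_goals simp only [decide_eq_true_iff, eX, eY, eZ] at *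
      all_goals first
      | (exfalso; omega)
      | (exfalso; tauto)
      | (rw [ih (i+1) j k _ (index+1) _ (by omega), dX, dY, dZ]; simp only [merge3];
         first
         | (split_ifs <;> first | (exfalso; omega) | (simp [writeSteps, List.append_assoc]; done))
         | (simp [writeSteps, List.append_assoc]; done))
      | (rw [ih i (j+1) k _ (index+1) _ (by omega), dX, dY, dZ]; simp only [merge3];
         first
         | (split_ifs <;> first | (exfalso; omega) | (simp [writeSteps, List.append_assoc]; done))
         | (simp [writeSteps, List.append_assoc]; done))
      | (rw [ih i j (k+1) _ (index+1) _ (by omega), dX, dY, dZ]; simp only [merge3];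
         first
         | (split_ifs <;> first | (exfalso; omega) | (simp [writeSteps, List.append_assoc]; done))
         | (simp [writeSteps, List.append_assoc]; done))
    · have eX : PySem.List.pyGetD la ((i : Nat) : Int) 0 = la'[i] := by rw [r1 i (c1.mpr hi), PySem.List.pyGetD_natCast]; exact List.getD_eq_getElem la' 0 hi
      have dX : la'.drop i = la'[i] :: la'.drop (i+1) := List.drop_eq_getElem_cons hi
      have eY : PySem.List.pyGetD ma ((j : Nat) : Int) 0 = ma'[j] := by rw [r2 j (c2.mpr hj), PySem.List.pyGetD_natCast]; exact List.getD_eq_getElem ma' 0 hj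
      have dY : ma'.drop j = ma'[j] :: ma'.drop (j+1) := List.drop_eq_getElem_cons hj
      have dZ : ra'.drop k = [] := List.drop_eq_nil_of_le (by omega)
      simp only [mergeLoopA, pyLtInf]
      rw [if_pos (show ((i:Int) < s1 ∨ (j:Int) < s2 ∨ (k:Int) < s3) from by omega)]
      split_ifs
      all_goals simp only [decide_eq_true_iff, eX, eY] at *
      all_goals first
      | (exfalso; omega)
      | (exfalso; tauto)
      | (rw [ih (i+1) j k _ (index+1) _ (by omega), dX, dY, dZ]; simp only [merge3];
         first
         | (split_ifs <;> first | (exfalso; omega) | (simp [writeSteps, List.append_assoc]; done))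
         | (simp [writeSteps, List.append_assoc]; done))
      | (rw [ih i (j+1) k _ (index+1) _ (by omega), dX, dY, dZ]; simp only [merge3];
         first
         | (split_ifs <;> first | (exfalso; omega) | (simp [writeSteps, List.append_assoc]; done))
         | (simp [writeSteps, List.append_assoc]; done))
      | (rw [ih i j (k+1) _ (index+1) _ (by omega), dX, dY, dZ]; simp only [merge3];
         first
         | (split_ifs <;> first | (exfalso; omega) | (simp [writeSteps, List.append_assoc]; done))
         | (simp [writeSteps, List.append_assoc]; done))
    · have eX : PySem.List.pyGetD la ((i : Nat) : Int) 0 = la'[i] := by rw [r1 i (c1.mpr hi), PySem.List.pyGetD_natCast]; exact List.getD_eq_getElem la' 0 hi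
      have dX : la'.drop i = la'[i] :: la'.drop (i+1) := List.drop_eq_getElem_cons hi
      have dY : ma'.drop j = [] := List.drop_eq_nil_of_le (by omega)
      have eZ : PySem.List.pyGetD ra ((k : Nat) : Int) 0 = ra'[k] := by rw [r3 k (c3.mpr hk), PySem.List.pyGetD_natCast]; exact List.getD_eq_getElem ra' 0 hk
      have dZ : ra'.drop k = ra'[k] :: ra'.drop (k+1) := List.drop_eq_getElem_cons hk
      simp only [mergeLoopA, pyLtInf]
      rw [if_pos (show ((i:Int) < s1 ∨ (j:Int) < s2 ∨ (k:Int) < s3) from by omega)]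
      split_ifs
      all_goals simp only [decide_eq_true_iff, eX, eZ] at *
      all_goals first
      | (exfalso; omega)
      | (exfalso; tauto)
      | (rw [ih (i+1) j k _ (index+1) _ (by omega), dX, dY, dZ]; simp only [merge3];
         first
         | (split_ifs <;> first | (exfalso; omega) | (simp [writeSteps, List.append_assoc]; done))
         | (simp [writeSteps, List.append_assoc]; done))
      | (rw [ih i (j+1) k _ (index+1) _ (by omega), dX, dY, dZ]; simp only [merge3];
         first
         | (split_ifs <;> first | (exfalso; omega) | (simp [writeSteps, List.append_assoc]; done))
         | (simp [writeSteps, List.append_assoc]; done))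
      | (rw [ih i j (k+1) _ (index+1) _ (by omega), dX, dY, dZ]; simp only [merge3];
         first
         | (split_ifs <;> first | (exfalso; omega) | (simp [writeSteps, List.append_assoc]; done))
         | (simp [writeSteps, List.append_assoc]; done))
    · have eX : PySem.List.pyGetD la ((i : Nat) : Int) 0 = la'[i] := by rw [r1 i (c1.mpr hi), PySem.List.pyGetD_natCast]; exact List.getD_eq_getElem la' 0 hi
      have dX : la'.drop i = la'[i] :: la'.drop (i+1) := List.drop_eq_getElem_cons hi
      have dY : ma'.drop j = [] := List.drop_eq_nil_of_le (by omega)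
      have dZ : ra'.drop k = [] := List.drop_eq_nil_of_le (by omega)
      simp only [mergeLoopA, pyLtInf]
      rw [if_pos (show ((i:Int) < s1 ∨ (j:Int) < s2 ∨ (k:Int) < s3) from by omega)]
      split_ifs
      all_goals simp only [decide_eq_true_iff, eX] at *
      all_goals first
      | (exfalso; omega)
      | (exfalso; tauto)
      | (rw [ih (i+1) j k _ (index+1) _ (by omega), dX, dY, dZ]; simp only [merge3];
         first
         | (split_ifs <;> first | (exfalso; omega) | (simp [writeSteps, List.append_assoc]; done))
         | (simp [writeSteps, List.append_assoc]; done))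
      | (rw [ih i (j+1) k _ (index+1) _ (by omega), dX, dY, dZ]; simp only [merge3];
         first
         | (split_ifs <;> first | (exfalso; omega) | (simp [writeSteps, List.append_assoc]; done))
         | (simp [writeSteps, List.append_assoc]; done))
      | (rw [ih i j (k+1) _ (index+1) _ (by omega), dX, dY, dZ]; simp only [merge3];
         first
         | (split_ifs <;> first | (exfalso; omega) | (simp [writeSteps, List.append_assoc]; done))
         | (simp [writeSteps, List.append_assoc]; done))
    · have dX : la'.drop i = [] := List.drop_eq_nil_of_le (by omega)
      have eY : PySem.List.pyGetD ma ((j : Nat) : Int) 0 = ma'[j] := by rw [r2 j (c2.mpr hj), PySem.List.pyGetD_natCast]; exact List.getD_eq_getElem ma' 0 hj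
      have dY : ma'.drop j = ma'[j] :: ma'.drop (j+1) := List.drop_eq_getElem_cons hj
      have eZ : PySem.List.pyGetD ra ((k : Nat) : Int) 0 = ra'[k] := by rw [r3 k (c3.mpr hk), PySem.List.pyGetD_natCast]; exact List.getD_eq_getElem ra' 0 hk
      have dZ : ra'.drop k = ra'[k] :: ra'.drop (k+1) := List.drop_eq_getElem_cons hk
      simp only [mergeLoopA, pyLtInf]
      rw [if_pos (show ((i:Int) < s1 ∨ (j:Int) < s2 ∨ (k:Int) < s3) from by omega)]
      split_ifs
      all_goals simp only [decide_eq_true_iff, eY, eZ] at *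
      all_goals first
      | (exfalso; omega)
      | (exfalso; tauto)
      | (rw [ih (i+1) j k _ (index+1) _ (by omega), dX, dY, dZ]; simp only [merge3];
         first
         | (split_ifs <;> first | (exfalso; omega) | (simp [writeSteps, List.append_assoc]; done))
         | (simp [writeSteps, List.append_assoc]; done))
      | (rw [ih i (j+1) k _ (index+1) _ (by omega), dX, dY, dZ]; simp only [merge3];
         first
         | (split_ifs <;> first | (exfalso; omega) | (simp [writeSteps, List.append_assoc]; done))
         | (simp [writeSteps, List.append_assoc]; done))
      | (rw [ih i j (k+1) _ (index+1) _ (by omega), dX, dY, dZ]; simp only [merge3];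
         first
         | (split_ifs <;> first | (exfalso; omega) | (simp [writeSteps, List.append_assoc]; done))
         | (simp [writeSteps, List.append_assoc]; done))
    · have dX : la'.drop i = [] := List.drop_eq_nil_of_le (by omega)
      have eY : PySem.List.pyGetD ma ((j : Nat) : Int) 0 = ma'[j] := by rw [r2 j (c2.mpr hj), PySem.List.pyGetD_natCast]; exact List.getD_eq_getElem ma' 0 hj
      have dY : ma'.drop j = ma'[j] :: ma'.drop (j+1) := List.drop_eq_getElem_cons hj
      have dZ : ra'.drop k = [] := List.drop_eq_nil_of_le (by omega)
      simp only [mergeLoopA, pyLtInf]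
      rw [if_pos (show ((i:Int) < s1 ∨ (j:Int) < s2 ∨ (k:Int) < s3) from by omega)]
      split_ifs
      all_goals simp only [decide_eq_true_iff, eY] at *
      all_goals first
      | (exfalso; omega)
      | (exfalso; tauto)
      | (rw [ih (i+1) j k _ (index+1) _ (by omega), dX, dY, dZ]; simp only [merge3];
         first
         | (split_ifs <;> first | (exfalso; omega) | (simp [writeSteps, List.append_assoc]; done))
         | (simp [writeSteps, List.append_assoc]; done))
      | (rw [ih i (j+1) k _ (index+1) _ (by omega), dX, dY, dZ]; simp only [merge3];
         first
         | (split_ifs <;> first | (exfalso; omega) | (simp [writeSteps, List.append_assoc]; done))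
         | (simp [writeSteps, List.append_assoc]; done))
      | (rw [ih i j (k+1) _ (index+1) _ (by omega), dX, dY, dZ]; simp only [merge3];
         first
         | (split_ifs <;> first | (exfalso; omega) | (simp [writeSteps, List.append_assoc]; done))
         | (simp [writeSteps, List.append_assoc]; done))
    · have dX : la'.drop i = [] := List.drop_eq_nil_of_le (by omega)
      have dY : ma'.drop j = [] := List.drop_eq_nil_of_le (by omega)
      have eZ : PySem.List.pyGetD ra ((k : Nat) : Int) 0 = ra'[k] := by rw [r3 k (c3.mpr hk), PySem.List.pyGetD_natCast]; exact List.getD_eq_getElem ra' 0 hk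
      have dZ : ra'.drop k = ra'[k] :: ra'.drop (k+1) := List.drop_eq_getElem_cons hk
      simp only [mergeLoopA, pyLtInf]
      rw [if_pos (show ((i:Int) < s1 ∨ (j:Int) < s2 ∨ (k:Int) < s3) from by omega)]
      split_ifs
      all_goals simp only [decide_eq_true_iff, eZ] at *
      all_goals first
      | (exfalso; omega)
      | (exfalso; tauto)
      | (rw [ih (i+1) j k _ (index+1) _ (by omega), dX, dY, dZ]; simp only [merge3];
         first
         | (split_ifs <;> first | (exfalso; omega) | (simp [writeSteps, List.append_assoc]; done))
         | (simp [writeSteps, List.append_assoc]; done))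
      | (rw [ih i (j+1) k _ (index+1) _ (by omega), dX, dY, dZ]; simp only [merge3];
         first
         | (split_ifs <;> first | (exfalso; omega) | (simp [writeSteps, List.append_assoc]; done))
         | (simp [writeSteps, List.append_assoc]; done))
      | (rw [ih i j (k+1) _ (index+1) _ (by omega), dX, dY, dZ]; simp only [merge3];
         first
         | (split_ifs <;> first | (exfalso; omega) | (simp [writeSteps, List.append_assoc]; done))
         | (simp [writeSteps, List.append_assoc]; done))
    · have dX : la'.drop i = [] := List.drop_eq_nil_of_le (by omega)
      have dY : ma'.drop j = [] := List.drop_eq_nil_of_le (by omega)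
      have dZ : ra'.drop k = [] := List.drop_eq_nil_of_le (by omega)
      simp only [mergeLoopA, pyLtInf]
      rw [if_neg (by omega)]
      simp [dX, dY, dZ, merge3, writeSteps]

-- ===== VERDICT (by name: the statement is the Claim_ definition above) =====
theorem merge_gen_py_spec : Claim_equal_merge_gen_py := by
  intro nums left mid1 mid2 right _ hpre
  obtain ⟨p1, p2, p3, _⟩ := hpre
  unfold Spec_merge_gen_py merge_gen_py merge_gen_py_alt
  dsimp only
  rw [show left + (mid1 - left + 1) = mid1 + 1 from by ring,
      show mid1 + 1 + (mid2 - mid1) = mid2 + 1 from by ring,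
      show mid2 + 1 + (right - mid2) = right + 1 from by ring]
  have key : ∀ (a b : Int),
      (b - a ≤ 0 ∨ ((PySem.List.slice nums (some a) (some b)).length : Int) = b - a) →
      ((PySem.List.pyRange a b 1).map (fun p => PySem.List.pyGetD nums p 0)
          = (if b - a ≤ 0 then [] else PySem.List.slice nums (some a) (some b)) ∧
        (((if b - a ≤ 0 then ([] : List Int) else PySem.List.slice nums (some a) (some b)).length : Int) = max (b - a) 0) ∧
        (∀ i : Nat, ((i : Nat) : Int) < b - a →
          PySem.List.pyGetD (PySem.List.slice nums (some a) (some b)) ((i : Nat) : Int) 0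
            = PySem.List.pyGetD (if b - a ≤ 0 then [] else PySem.List.slice nums (some a) (some b)) ((i : Nat) : Int) 0)) := by
    intro a b hp
    by_cases hb : b - a ≤ 0
    · refine ⟨?_, by rw [if_pos hb, show max (b - a) 0 = 0 from by omega]; simp, by intro i hi; omega⟩
      rw [if_pos hb]
      simp [PySem.List.pyRange, show ¬ a < b from by omega]
    · have hlen : ((PySem.List.slice nums (some a) (some b)).length : Int) = b - a := by
        rcases hp with h | h
        · omega
        · exact h
      refine ⟨?_, by rw [if_neg hb]; omega, by intro i hi; rw [if_neg hb]⟩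
      rw [if_neg hb]
      exact gather_eq_slice nums a b hlen
  obtain ⟨g1, h1, r1⟩ := key left (mid1 + 1) (by omega)
  obtain ⟨g2, h2, r2⟩ := key (mid1 + 1) (mid2 + 1) (by omega)
  obtain ⟨g3, h3, r3⟩ := key (mid2 + 1) (right + 1) (by omega)
  rw [show (mid1 + 1 : Int) - left = mid1 - left + 1 from by ring] at g1 h1 r1
  rw [show (mid2 + 1 : Int) - (mid1 + 1) = mid2 - mid1 from by ring] at g2 h2 r2
  rw [show (right + 1 : Int) - (mid2 + 1) = right - mid2 from by ring] at g3 h3 r3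
  rw [loopA_eq _ _ _ _ _ _ _ _ _ h1 h2 h3 r1 r2 r3 _ 0 0 0 nums left [] (by omega)]
  rw [g1, g2, g3]
  simp [merge3_eq_merge2]
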